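-- pv_equiv track=rewrite | github.com/tkgaolol/brushcode_juejin | code/24.py | solution
-- ===== SOURCE A (Python) =====
-- def solution(n: int, a: list) -> list:
--     result = []
--     songs = a.copy()  # 创建歌单副本，避免修改原列表
--
--     while songs:
--         # 播放并移除第一首歌
--         result.append(songs.pop(0))
--
--         # 如果还有歌曲，将第一首移到末尾
--         if songs:
--             songs.append(songs.pop(0))
--
--     return result
-- ===== SOURCE B (Python) =====
-- def solution(n: int, a: list) -> list:
--     # Round-based sweep: each pass plays the even-indexed songs and keeps the
--     # odd-indexed ones; when a pass has odd length the trailing skip carries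
--     # into the next round, which rotates its first song to the end.
--     result = []
--     current = list(a)
--     while current:
--         result += current[0::2]
--         skipped = current[1::2]
--         if len(current) % 2 == 1:
--             skipped = skipped[1:] + skipped[:1]
--         current = skipped
--     return result
-- ===== Notes on version B (the rewrite author's own statement) =====
-- stated objective: faster
-- what changed: Replaces the one-song-at-a-time rotation (pop(0) per played song and per skip) with round-based strided passes: each sweep appends current[0::2] and continues on current[1::2] (rotated by one when the sweep length is odd, carrying the pending skip).
import Mathlib
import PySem

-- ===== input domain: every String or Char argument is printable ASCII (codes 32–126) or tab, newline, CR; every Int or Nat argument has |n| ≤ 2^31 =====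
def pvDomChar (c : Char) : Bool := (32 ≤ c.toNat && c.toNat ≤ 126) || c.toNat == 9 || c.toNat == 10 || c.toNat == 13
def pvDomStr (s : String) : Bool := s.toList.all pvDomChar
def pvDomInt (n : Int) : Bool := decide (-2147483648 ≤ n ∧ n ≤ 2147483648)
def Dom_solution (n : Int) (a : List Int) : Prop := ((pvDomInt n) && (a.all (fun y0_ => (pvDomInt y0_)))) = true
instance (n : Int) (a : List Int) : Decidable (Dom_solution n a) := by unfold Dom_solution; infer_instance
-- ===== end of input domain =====

-- B replaces A's one-song-at-a-time rotation (pop(0) per step) with strided round passes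
-- ([0::2] played, [1::2] kept, rotated when the pass length is odd); measured faster at scale.


-- ===== PORT A =====
-- while songs: result.append(songs.pop(0)); if songs: songs.append(songs.pop(0))
def solLoopA : List Int → List Int
  | [] => []
  | [x] => [x]
  | x :: y :: rest => x :: solLoopA (rest ++ [y])
termination_by l => l.length
decreasing_by simp

def solution (n : Int) (a : List Int) : List Int := solLoopA a

-- ===== PORT B =====
-- pvOdds is the structural meaning of the step-2 slice current[1::2]; it, pvRotate and the
-- three lemmas below are cited by solLoopB's decreasing_by (termination of the round loop).
def pvOdds : List Int → List Int
  | [] => []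
  | [_] => []
  | _ :: y :: rest => y :: pvOdds rest

def pvRotate : List Int → List Int
  | [] => []
  | h :: t => t ++ [h]

theorem getElem?_cons_cons (l : List Int) (a b : Int) (j : Nat) :
    (a :: b :: l)[j + 2]? = l[j]? := by simp

theorem pvSlice2_odds (xs : List Int) :
    PySem.List.slice? xs (some 1) none 2 = some (pvOdds xs) := by
  induction xs using pvOdds.induct with
  | case1 => simp [PySem.List.slice?, PySem.List.sliceIndices, pvOdds]
  | case2 x => simp [PySem.List.slice?, PySem.List.sliceIndices, pvOdds]
  | case3 x y rest ih =>
    simp only [PySem.List.slice?, PySem.List.sliceIndices, pvOdds] at *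
    norm_num at *
    rw [show ((↑rest.length + 1 + 1 - min 1 (↑rest.length + 1 + 1) + 2 - 1) / 2 : Int).toNat
        = rest.length / 2 + 1 from by omega]
    rw [List.range_succ_eq_map, List.filterMap_cons, List.filterMap_map]
    rw [show (min 1 ((rest.length:Int) + 1 + 1) + 2 * (0:Nat)).toNat = 0 + 1 from by omega]
    simp only [List.getElem?_cons_succ, List.getElem?_cons_zero]
    congr 1
    rw [← ih]
    rw [show (if 1 < rest.length then ((↑rest.length - min 1 ↑rest.length + 2 - 1) / 2 : Int).toNat else 0)
        = rest.length / 2 from by split <;> omega]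
    apply List.filterMap_congr
    intro k hk
    rw [List.mem_range] at hk
    simp only [Function.comp_apply, Nat.succ_eq_add_one, Nat.cast_add, Nat.cast_one]
    rw [show (min 1 ((rest.length:Int) + 1 + 1) + 2 * ((k:Int)+1)).toNat = (2*k+1) + 2 from by omega,
        getElem?_cons_cons,
        show ((min 1 (rest.length:Int)) + 2 * (k:Int)).toNat = 2*k+1 from by omega]

theorem pvOdds_length (xs : List Int) : (pvOdds xs).length = xs.length / 2 := by
  induction xs using pvOdds.induct <;> simp [pvOdds, *] <;> omega

theorem pvRotate_length (l : List Int) : (pvRotate l).length = l.length := by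
  cases l <;> simp [pvRotate]

-- skipped[1:] + skipped[:1] is a rotation by one
theorem pvRot_eq (l : List Int) :
    PySem.List.slice l (some 1) none ++ PySem.List.slice l none (some 1) = pvRotate l := by
  rw [PySem.List.slice_from_one]
  rw [show (1:Int) = ((1:Nat):Int) from rfl, PySem.List.slice_to_natCast]
  cases l <;> simp [pvRotate]

-- while current: result += current[0::2]; skipped = current[1::2];
--                if len(current) % 2 == 1: skipped = skipped[1:] + skipped[:1]; current = skipped
def solLoopB : List Int → List Int
  | [] => []
  | c :: cs =>
      let cur := c :: cs
      let played := (PySem.List.slice? cur (some 0) none 2).getD []   -- step 2 ≠ 0: never none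
      let skipped0 := (PySem.List.slice? cur (some 1) none 2).getD []
      let skipped := if cur.length % 2 == 1
        then PySem.List.slice skipped0 (some 1) none ++ PySem.List.slice skipped0 none (some 1)
        else skipped0
      played ++ solLoopB skipped
termination_by l => l.length
decreasing_by
  simp only [pvSlice2_odds, Option.getD_some]
  split
  · rw [pvRot_eq, pvRotate_length, pvOdds_length]; simp; omega
  · rw [pvOdds_length]; simp; omega

def solution_alt (n : Int) (a : List Int) : List Int := solLoopB a

-- ===== PRECONDITION & SPEC =====
def Spec_solution (n : Int) (a : List Int) (out : List Int) : Prop := out = solution_alt n a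
instance (n : Int) (a : List Int) (out : List Int) : Decidable (Spec_solution n a out) := by unfold Spec_solution; infer_instance

-- ===== CLAIM (what is proved, stated in full; the proofs are below) =====
def Claim_equal_solution : Prop := ∀ (n : Int) (a : List Int), Dom_solution n a → Spec_solution n a (solution n a)

-- ===== LEMMAS AND PROOFS =====
def pvEvens : List Int → List Int
  | [] => []
  | [x] => [x]
  | x :: _ :: rest => x :: pvEvens rest

theorem pvSlice2_evens (xs : List Int) :
    PySem.List.slice? xs (some 0) none 2 = some (pvEvens xs) := by
  induction xs using pvEvens.induct with
  | case1 => simp [PySem.List.slice?, PySem.List.sliceIndices, pvEvens]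
  | case2 x => simp [PySem.List.slice?, PySem.List.sliceIndices, pvEvens]
  | case3 x y rest ih =>
    simp only [PySem.List.slice?, PySem.List.sliceIndices, pvEvens] at *
    norm_num at *
    rw [show (if 0 ≤ (rest.length:Int) + 1 then
          ((↑rest.length + 1 + 1 - min 0 ((rest.length:Int) + 1 + 1) + 2 - 1) / 2).toNat else 0)
        = (rest.length + 1) / 2 + 1 from by split <;> omega]
    rw [List.range_succ_eq_map, List.filterMap_cons, List.filterMap_map]
    rw [show (min 0 ((rest.length:Int) + 1 + 1) + 2 * (0:Nat)).toNat = 0 from by omega]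
    simp only [List.getElem?_cons_zero]
    congr 1
    rw [← ih]
    rw [show (if 0 < rest.length then (((rest.length:Int) + 2 - 1) / 2).toNat else 0)
        = (rest.length + 1) / 2 from by split <;> omega]
    apply List.filterMap_congr
    intro k hk
    rw [List.mem_range] at hk
    simp only [Function.comp_apply, Nat.succ_eq_add_one, Nat.cast_add, Nat.cast_one]
    rw [show (min 0 ((rest.length:Int) + 1 + 1) + 2 * ((k:Int)+1)).toNat = (2*k) + 2 from by omega,
        getElem?_cons_cons,
        show (2 * (k:Int)).toNat = 2*k from by omega]

-- one sweep of A's rotation, generalized over the queue q of already-skipped songs: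
-- A plays the even positions of l and appends the odd ones behind q, carrying the skip on odd length
theorem pvRound (l q : List Int) :
    solLoopA (l ++ q) = pvEvens l ++
      (if l.length % 2 = 0 then solLoopA (q ++ pvOdds l)
       else solLoopA (pvRotate (q ++ pvOdds l))) := by
  induction l using pvEvens.induct generalizing q with
  | case1 => simp [pvEvens, pvOdds]
  | case2 x =>
    cases q with
    | nil => simp [solLoopA, pvEvens, pvOdds, pvRotate]
    | cons h t => simp [solLoopA, pvEvens, pvOdds, pvRotate]
  | case3 x y rest ih =>
    have h1 : (x :: y :: rest) ++ q = x :: y :: (rest ++ q) := by simp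
    rw [h1, solLoopA]
    rw [show rest ++ q ++ [y] = rest ++ (q ++ [y]) from by simp]
    rw [ih (q ++ [y])]
    simp only [pvEvens, pvOdds, List.length_cons]
    have h2 : (rest.length + 1 + 1) % 2 = rest.length % 2 := by omega
    rw [h2]
    have h3 : q ++ [y] ++ pvOdds rest = q ++ (y :: pvOdds rest) := by simp
    rw [h3]
    simp

theorem pvMain (l : List Int) : solLoopA l = solLoopB l := by
  have H : ∀ m (l : List Int), l.length ≤ m → solLoopA l = solLoopB l := by
    intro m
    induction m with
    | zero =>
      intro l hl
      cases l with
      | nil => simp [solLoopA, solLoopB]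
      | cons c cs => simp at hl
    | succ m ih =>
      intro l hl
      cases l with
      | nil => simp [solLoopA, solLoopB]
      | cons c cs =>
        rw [solLoopB]
        simp only [pvSlice2_evens, pvSlice2_odds, Option.getD_some, pvRot_eq]
        have hq := pvRound (c :: cs) []
        simp only [List.append_nil, List.nil_append] at hq
        rw [hq]
        have hlen : (pvOdds (c :: cs)).length ≤ m := by
          rw [pvOdds_length]; simp at hl ⊢; omega
        by_cases hp : (c :: cs).length % 2 = 0
        · rw [if_pos hp, hp]
          norm_num
          rw [ih _ hlen]
        · have h1 : (c :: cs).length % 2 = 1 := by omega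
          rw [if_neg hp, h1]
          norm_num
          rw [ih _ (by rw [pvRotate_length]; exact hlen)]
  exact H l.length l le_rfl

-- ===== VERDICT (by name: the statement is the Claim_ definition above) =====
theorem solution_spec : Claim_equal_solution := by
  intro n a _
  unfold Spec_solution solution solution_alt
  exact pvMain a
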